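-- pv_equiv track=rewrite | github.com/SY97P/Daily_Algo_Exercise | src/프로그래머스/lv3/사라지는_발판.py | dfs
-- ===== SOURCE A (Python) =====
-- def get_next_loc(loc, board):
--     for dx, dy in ((0, 1), (0, -1), (1, 0), (-1, 0)):
--         next = (loc[0] + dx, loc[1] + dy)
--         if next in board:
--             yield *next, loc[-1]
--
-- def dfs(aloc, bloc, board, step):
--     next_loc = list(get_next_loc(aloc, board))
--     if not next_loc or aloc[:2] not in board:
--         return False, step
--
--     rtns = [dfs(bloc, next, board - {next[:2]}, step + 1) for next in next_loc]
--     wins = [rtn[1] for rtn in rtns if not rtn[0]]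
--     loses = [rtn[1] for rtn in rtns if rtn[0]]
--
--     if wins:
--         return True, min(wins)
--     else:
--         return False, max(loses)
-- ===== SOURCE B (Python) =====
-- def _solve(aloc, bloc, board):
--     # returns (does the player to move win?, extra steps beyond the caller's count)
--     x, y = aloc[0], aloc[1]
--     if (x, y) not in board:
--         return False, 0
--     min_win = None
--     max_lose = None
--     for dx, dy in ((0, 1), (0, -1), (1, 0), (-1, 0)):
--         nxt = (x + dx, y + dy)
--         if nxt in board:
--             w, d = _solve(bloc, nxt, board - {nxt})
--             if w:
--                 max_lose = d if max_lose is None else max(max_lose, d)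
--             else:
--                 min_win = d if min_win is None else min(min_win, d)
--     if min_win is not None:
--         return True, min_win + 1
--     if max_lose is not None:
--         return False, max_lose + 1
--     return False, 0
--
-- def dfs(aloc, bloc, board, step):
--     w, d = _solve(aloc, bloc, board)
--     return w, step + d
-- ===== Notes on version B (the rewrite author's own statement) =====
-- stated objective: alternative
-- what changed: B replaces A's generator helper, the three intermediate lists (rtns/wins/loses) and the min()/max() calls by a step-free recursive core that returns the relative extra depth (the caller adds step once) and a single pass over the four directions maintaining running min/max accumulators.
import Mathlib
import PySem

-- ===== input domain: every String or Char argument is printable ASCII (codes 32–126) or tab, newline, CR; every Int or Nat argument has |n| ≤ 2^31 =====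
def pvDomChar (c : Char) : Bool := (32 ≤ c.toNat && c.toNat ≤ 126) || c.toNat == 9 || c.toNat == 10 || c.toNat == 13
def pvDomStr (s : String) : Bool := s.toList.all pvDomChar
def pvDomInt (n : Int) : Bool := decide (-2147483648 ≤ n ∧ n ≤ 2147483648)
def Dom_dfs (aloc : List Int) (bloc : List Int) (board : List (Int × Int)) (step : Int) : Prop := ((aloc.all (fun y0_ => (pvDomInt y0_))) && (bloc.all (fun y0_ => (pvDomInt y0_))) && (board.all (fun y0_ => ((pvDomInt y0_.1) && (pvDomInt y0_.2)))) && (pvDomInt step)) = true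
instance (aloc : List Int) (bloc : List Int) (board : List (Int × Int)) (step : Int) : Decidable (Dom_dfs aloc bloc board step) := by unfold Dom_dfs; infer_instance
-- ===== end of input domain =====

-- B replaces A's generator + three intermediate lists + min()/max() calls by a step-free
-- recursive core returning RELATIVE depth (the caller adds `step`) and a single fold over the
-- four directions maintaining running min/max accumulators: same value, different decomposition.

-- the four move directions, shared constant
def pvDirs : List (Int × Int) := [(0, 1), (0, -1), (1, 0), (-1, 0)]

-- ===== PORT A =====
-- generator get_next_loc: loc[0], loc[1], loc[-1] via pyGet? (Pre_ guarantees len(loc) ≥ 2, so getD 0 is never used)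
def get_next_loc (loc : List Int) (board : List (Int × Int)) : List (Int × Int × Int) :=
  pvDirs.filterMap (fun d =>
    let nxt : Int × Int := ((PySem.List.pyGet? loc 0).getD 0 + d.1, (PySem.List.pyGet? loc 1).getD 0 + d.2)
    if nxt ∈ board then some (nxt.1, nxt.2, (PySem.List.pyGet? loc (-1)).getD 0) else none)

-- termination helpers cited by the ports' decreasing_by
theorem pv_mem_board_of_mem_next {loc : List Int} {board : List (Int × Int)} {n : Int × Int × Int}
    (h : n ∈ get_next_loc loc board) : (n.1, n.2.1) ∈ board := by
  unfold get_next_loc at h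
  simp only [List.mem_filterMap] at h
  obtain ⟨d, -, hd⟩ := h
  split at hd
  · cases hd; simpa using ‹_›
  · cases hd

theorem pv_diff_lt {board : List (Int × Int)} {p : Int × Int} (h : p ∈ board) :
    (PySem.Set.diff board [p]).length < board.length := by
  simp only [PySem.Set.diff]
  rw [List.length_filter_lt_length_iff_exists]
  exact ⟨p, h, by simp⟩

-- dfs: Python's `aloc[:2] not in board` is the pair of aloc's first two entries (len ≥ 2 by Pre_)
def dfs (aloc : List Int) (bloc : List Int) (board : List (Int × Int)) (step : Int) : Bool × Int :=
  let next_loc := get_next_loc aloc board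
  if next_loc.isEmpty ∨ ((PySem.List.pyGet? aloc 0).getD 0, (PySem.List.pyGet? aloc 1).getD 0) ∉ board then
    (false, step)
  else
    let rtns := next_loc.attach.map (fun n =>
      dfs bloc [n.1.1, n.1.2.1, n.1.2.2] (PySem.Set.diff board [(n.1.1, n.1.2.1)]) (step + 1))
    let wins := (rtns.filter (fun r => !r.1)).map (fun r => r.2)
    let loses := (rtns.filter (fun r => r.1)).map (fun r => r.2)
    if !wins.isEmpty then (true, (PySem.List.min? wins (fun z => z)).getD 0)
    else (false, (PySem.List.max? loses (fun z => z)).getD 0)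
termination_by board.length
decreasing_by exact pv_diff_lt (pv_mem_board_of_mem_next n.2)

-- ===== PORT B =====
-- _solve: step-free core; one pass over the four directions with running min/max accumulators
def solveB (aloc : List Int) (bloc : List Int) (board : List (Int × Int)) : Bool × Int :=
  let x := (PySem.List.pyGet? aloc 0).getD 0
  let y := (PySem.List.pyGet? aloc 1).getD 0
  if (x, y) ∉ board then (false, 0)
  else
    let st := pvDirs.foldl (fun (st : Option Int × Option Int) d =>
      if h : (x + d.1, y + d.2) ∈ board then
        let r := solveB bloc [x + d.1, y + d.2] (PySem.Set.diff board [(x + d.1, y + d.2)])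
        if r.1 then (st.1, some (match st.2 with | none => r.2 | some m => max m r.2))
        else (some (match st.1 with | none => r.2 | some m => min m r.2), st.2)
      else st) (none, none)
    match st.1 with
    | some m => (true, m + 1)
    | none =>
      match st.2 with
      | some m => (false, m + 1)
      | none => (false, 0)
termination_by board.length
decreasing_by exact pv_diff_lt h

def dfs_alt (aloc : List Int) (bloc : List Int) (board : List (Int × Int)) (step : Int) : Bool × Int :=
  let r := solveB aloc bloc board
  (r.1, step + r.2)

-- ===== PRECONDITION & SPEC =====
-- Pre_ excludes exactly the inputs where Python A raises IndexError: aloc shorter than 2, or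
-- bloc shorter than 2 when a first move exists (i.e. some neighbour of aloc is on the board and
-- aloc's own square is on the board, so the recursion fires and indexes bloc).
def Pre_dfs (aloc : List Int) (bloc : List Int) (board : List (Int × Int)) (step : Int) : Prop :=
  2 ≤ aloc.length ∧
  (2 ≤ bloc.length ∨
   (∀ d ∈ pvDirs, ((PySem.List.pyGet? aloc 0).getD 0 + d.1, (PySem.List.pyGet? aloc 1).getD 0 + d.2) ∉ board) ∨
   ((PySem.List.pyGet? aloc 0).getD 0, (PySem.List.pyGet? aloc 1).getD 0) ∉ board)
instance (aloc : List Int) (bloc : List Int) (board : List (Int × Int)) (step : Int) : Decidable (Pre_dfs aloc bloc board step) := by unfold Pre_dfs; infer_instance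

def pvWitness_dfs : List Int × List Int × (List (Int × Int)) × Int := ([0, 0], [1, 1], [(0, 1), (1, 1)], 0)

def Spec_dfs (aloc : List Int) (bloc : List Int) (board : List (Int × Int)) (step : Int) (out : Bool × Int) : Prop := out = dfs_alt aloc bloc board step
instance (aloc : List Int) (bloc : List Int) (board : List (Int × Int)) (step : Int) (out : Bool × Int) : Decidable (Spec_dfs aloc bloc board step out) := by unfold Spec_dfs; infer_instance

-- ===== CLAIM (what is proved, stated in full; the proofs are below) =====
def Claim_equal_dfs : Prop := ∀ (aloc : List Int) (bloc : List Int) (board : List (Int × Int)) (step : Int), Dom_dfs aloc bloc board step → Pre_dfs aloc bloc board step → Spec_dfs aloc bloc board step (dfs aloc bloc board step)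

-- ===== LEMMAS AND PROOFS =====

-- the per-direction result B's fold consumes (some = the move exists on the board)
def pvGB (bloc : List Int) (board : List (Int × Int)) (x y : Int) (d : Int × Int) : Option (Bool × Int) :=
  if (x + d.1, y + d.2) ∈ board then
    some (solveB bloc [x + d.1, y + d.2] (PySem.Set.diff board [(x + d.1, y + d.2)]))
  else none

def pvComb (st : Option Int × Option Int) (r : Bool × Int) : Option Int × Option Int :=
  if r.1 then (st.1, some (match st.2 with | none => r.2 | some m => max m r.2))
  else (some (match st.1 with | none => r.2 | some m => min m r.2), st.2)

def pvMergeMin (a : Option Int) (l : List Int) : Option Int :=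
  l.foldl (fun a v => some (match a with | none => v | some m => min m v)) a

def pvMergeMax (a : Option Int) (l : List Int) : Option Int :=
  l.foldl (fun a v => some (match a with | none => v | some m => max m v)) a

-- B's guarded fold over directions = plain fold over the filterMap'ed per-move results
theorem pv_fold_skip (bloc : List Int) (board : List (Int × Int)) (x y : Int) :
    ∀ (D : List (Int × Int)) (st : Option Int × Option Int),
    D.foldl (fun (st : Option Int × Option Int) d =>
      if h : (x + d.1, y + d.2) ∈ board then
        let r := solveB bloc [x + d.1, y + d.2] (PySem.Set.diff board [(x + d.1, y + d.2)])
        if r.1 then (st.1, some (match st.2 with | none => r.2 | some m => max m r.2))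
        else (some (match st.1 with | none => r.2 | some m => min m r.2), st.2)
      else st) st
    = (D.filterMap (pvGB bloc board x y)).foldl pvComb st := by
  intro D
  induction D with
  | nil => intro st; rfl
  | cons d D ih =>
    intro st
    by_cases h : (x + d.1, y + d.2) ∈ board
    · simp only [List.foldl_cons, List.filterMap_cons, pvGB, if_pos h, dif_pos h, ih, pvComb]
    · simp only [List.foldl_cons, List.filterMap_cons, pvGB, if_neg h, dif_neg h, ih]

-- folding pvComb = (running min of the win-steps, running max of the lose-steps)
theorem pv_fold_comb : ∀ (rs : List (Bool × Int)) (st : Option Int × Option Int),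
    rs.foldl pvComb st
    = (pvMergeMin st.1 ((rs.filter (fun r => !r.1)).map (fun r => r.2)),
       pvMergeMax st.2 ((rs.filter (fun r => r.1)).map (fun r => r.2))) := by
  intro rs
  induction rs with
  | nil => intro st; rfl
  | cons r rs ih =>
    intro st
    cases hr : r.1 <;>
      simp only [List.foldl_cons, pvComb, hr, if_pos, if_neg, Bool.not_true, Bool.not_false,
        List.filter_cons, ih, pvMergeMin, pvMergeMax, List.map_cons, List.foldl_cons,
        Bool.false_eq_true, not_false_eq_true,]

theorem pv_mergeMin_some : ∀ (l : List Int) (m : Int), pvMergeMin (some m) l = some (l.foldl min m) := by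
  intro l
  induction l with
  | nil => intro m; rfl
  | cons v l ih => intro m; simp only [pvMergeMin, List.foldl_cons] at *; exact ih (min m v)

theorem pv_mergeMax_some : ∀ (l : List Int) (m : Int), pvMergeMax (some m) l = some (l.foldl max m) := by
  intro l
  induction l with
  | nil => intro m; rfl
  | cons v l ih => intro m; simp only [pvMergeMax, List.foldl_cons] at *; exact ih (max m v)

theorem pv_foldl_min_shift : ∀ (l : List Int) (c m : Int),
    (l.map (fun z => c + z)).foldl min (c + m) = c + l.foldl min m := by
  intro l
  induction l with
  | nil => intro c m; rfl
  | cons v l ih =>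
    intro c m
    simp only [List.map_cons, List.foldl_cons, min_add_add_left c m v]
    exact ih c (min m v)

theorem pv_foldl_max_shift : ∀ (l : List Int) (c m : Int),
    (l.map (fun z => c + z)).foldl max (c + m) = c + l.foldl max m := by
  intro l
  induction l with
  | nil => intro c m; rfl
  | cons v l ih =>
    intro c m
    simp only [List.map_cons, List.foldl_cons, max_add_add_left c m v]
    exact ih c (max m v)

-- solveB only reads its first argument's first two entries
theorem pv_solveB_three (a b c : Int) (bloc : List Int) (board : List (Int × Int)) :
    solveB [a, b, c] bloc board = solveB [a, b] bloc board := by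
  rw [solveB, solveB]
  simp only [PySem.List.pyGet?, PySem.List.pyIdx?]
  norm_num

-- and it only reads its second argument's first two entries (it becomes the first argument one level down)
theorem pv_solveB_snd (a b c : Int) (aloc : List Int) (board : List (Int × Int)) :
    solveB aloc [a, b, c] board = solveB aloc [a, b] board := by
  rw [solveB, solveB]
  simp only [pv_solveB_three]

-- A's mapped recursion results, rewritten through solveB, = shifted per-move results
theorem pv_rtns_eq (bloc : List Int) (board : List (Int × Int)) (x y w3 c : Int) :
    ∀ D : List (Int × Int),
    ((D.filterMap (fun d =>
        let nxt : Int × Int := (x + d.1, y + d.2)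
        if nxt ∈ board then some (nxt.1, nxt.2, w3) else none)).map
      (fun n => ((solveB bloc [n.1, n.2.1] (PySem.Set.diff board [(n.1, n.2.1)])).1,
                 c + (solveB bloc [n.1, n.2.1] (PySem.Set.diff board [(n.1, n.2.1)])).2)))
    = (D.filterMap (pvGB bloc board x y)).map (fun r => (r.1, c + r.2)) := by
  intro D
  induction D with
  | nil => rfl
  | cons d D ih =>
    by_cases h : (x + d.1, y + d.2) ∈ board
    · simp only [List.filterMap_cons, pvGB, if_pos h, List.map_cons, ih]
    · simp only [List.filterMap_cons, pvGB, if_neg h, ih]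

-- the two filterMaps (A's move list, B's per-move results) are empty together
theorem pv_nil_iff (bloc : List Int) (board : List (Int × Int)) (x y w3 : Int) (D : List (Int × Int)) :
    (D.filterMap (fun d =>
        let nxt : Int × Int := (x + d.1, y + d.2)
        if nxt ∈ board then some (nxt.1, nxt.2, w3) else none) = [])
    ↔ (D.filterMap (pvGB bloc board x y) = []) := by
  simp only [List.filterMap_eq_nil_iff, pvGB]
  constructor <;> intro h d hd <;> have h' := h d hd <;>
    by_cases hm : (x + d.1, y + d.2) ∈ board <;> simp [hm] at h' ⊢

theorem pv_filter_split (rs : List (Bool × Int))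
    (h1 : rs.filter (fun r => !r.1) = []) (h2 : rs.filter (fun r => r.1) = []) : rs = [] := by
  cases rs with
  | nil => rfl
  | cons r rs =>
    cases hr : r.1 <;> simp [List.filter_cons, hr] at h1 h2

theorem pv_attach_map {α β : Type} (l : List α) (f : α → β) :
    l.attach.map (fun x => f x.1) = l.map f := List.attach_map_val

theorem pv_mergeMin_cons (l : List Int) (v : Int) : pvMergeMin none (v :: l) = some (l.foldl min v) := by
  have : pvMergeMin none (v :: l) = pvMergeMin (some v) l := rfl
  rw [this, pv_mergeMin_some]

theorem pv_mergeMax_cons (l : List Int) (v : Int) : pvMergeMax none (v :: l) = some (l.foldl max v) := by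
  have : pvMergeMax none (v :: l) = pvMergeMax (some v) l := rfl
  rw [this, pv_mergeMax_some]

-- shifting all second components commutes with A's filter/map extraction
theorem pv_wins_shift (rs : List (Bool × Int)) (c : Int) :
    (((rs.map (fun r => (r.1, c + r.2))).filter (fun r => !r.1)).map (fun r => r.2))
    = ((rs.filter (fun r => !r.1)).map (fun r => r.2)).map (fun z => c + z) := by
  induction rs with
  | nil => rfl
  | cons r rs ih => cases hr : r.1 <;> simp [List.filter_cons, hr, ih]

theorem pv_loses_shift (rs : List (Bool × Int)) (c : Int) :
    (((rs.map (fun r => (r.1, c + r.2))).filter (fun r => r.1)).map (fun r => r.2))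
    = ((rs.filter (fun r => r.1)).map (fun r => r.2)).map (fun z => c + z) := by
  induction rs with
  | nil => rfl
  | cons r rs ih => cases hr : r.1 <;> simp [List.filter_cons, hr, ih]

-- the central equivalence: A's dfs = B's step-free core shifted by step
theorem pv_key : ∀ (n : Nat) (board : List (Int × Int)), board.length ≤ n →
    ∀ (aloc bloc : List Int) (step : Int),
    dfs aloc bloc board step = ((solveB aloc bloc board).1, step + (solveB aloc bloc board).2) := by
  intro n
  induction n with
  | zero =>
    intro board hlen aloc bloc step
    have hb : board = [] := List.length_eq_zero_iff.mp (Nat.le_zero.mp hlen)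
    subst hb
    rw [dfs, solveB]
    simp [get_next_loc, pvDirs]
  | succ n ih =>
    intro board hlen aloc bloc step
    rw [dfs, solveB]
    dsimp only
    set x := (PySem.List.pyGet? aloc 0).getD 0 with hx
    set y := (PySem.List.pyGet? aloc 1).getD 0 with hy
    set w3 := (PySem.List.pyGet? aloc (-1)).getD 0 with hw3
    set rs := pvDirs.filterMap (pvGB bloc board x y) with hrs
    by_cases hm : (x, y) ∈ board
    · have hmB : ¬((x, y) ∉ board) := not_not_intro hm
      rw [if_neg hmB]
      rw [pv_fold_skip, pv_fold_comb, ← hrs]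
      by_cases hnl : get_next_loc aloc board = []
      · have hrsnil : rs = [] := (pv_nil_iff bloc board x y w3 pvDirs).mp hnl
        rw [hrsnil, hnl]
        simp [pvMergeMin, pvMergeMax]
      · -- the recursive case
        have hrtns : (get_next_loc aloc board).attach.map (fun nsub =>
              dfs bloc [nsub.1.1, nsub.1.2.1, nsub.1.2.2]
                (PySem.Set.diff board [(nsub.1.1, nsub.1.2.1)]) (step + 1))
            = rs.map (fun r => (r.1, (step + 1) + r.2)) := by
          have h0 : (get_next_loc aloc board).attach.map (fun nsub =>
              dfs bloc [nsub.1.1, nsub.1.2.1, nsub.1.2.2]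
                (PySem.Set.diff board [(nsub.1.1, nsub.1.2.1)]) (step + 1))
              = (get_next_loc aloc board).map (fun m =>
              dfs bloc [m.1, m.2.1, m.2.2] (PySem.Set.diff board [(m.1, m.2.1)]) (step + 1)) :=
            pv_attach_map (get_next_loc aloc board) (fun m =>
              dfs bloc [m.1, m.2.1, m.2.2] (PySem.Set.diff board [(m.1, m.2.1)]) (step + 1))
          rw [h0]
          rw [List.map_congr_left (fun m hmem => by
            have hmb : (m.1, m.2.1) ∈ board := pv_mem_board_of_mem_next hmem
            have hlt : (PySem.Set.diff board [(m.1, m.2.1)]).length ≤ n := by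
              have := pv_diff_lt hmb; omega
            rw [ih _ hlt bloc [m.1, m.2.1, m.2.2] (step + 1), pv_solveB_snd])]
          exact pv_rtns_eq bloc board x y w3 (step + 1) pvDirs
        have hne : ¬((get_next_loc aloc board).isEmpty = true ∨ (x, y) ∉ board) := by
          simp [hnl, hm]
        rw [if_neg hne]
        rw [hrtns, pv_wins_shift, pv_loses_shift]
        have hrsne : rs ≠ [] := fun h => hnl ((pv_nil_iff bloc board x y w3 pvDirs).mpr h)
        cases hws : (rs.filter (fun r => !r.1)).map (fun r => r.2) with
        | cons w ws =>
          rw [pv_mergeMin_cons]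
          simp [PySem.List.min?_id_cons, pv_foldl_min_shift, Prod.ext_iff]
          ring
        | nil =>
          cases hls : (rs.filter (fun r => r.1)).map (fun r => r.2) with
          | nil =>
            exact absurd (pv_filter_split rs (List.map_eq_nil_iff.mp hws) (List.map_eq_nil_iff.mp hls)) hrsne
          | cons l ls =>
            rw [pv_mergeMax_cons]
            have hmm : pvMergeMin none ([] : List Int) = none := rfl
            simp [hmm, PySem.List.max?_id_cons, pv_foldl_max_shift, Prod.ext_iff]
            ring
    · -- aloc's own square is gone: both sides return with no extra steps
      have h1 : ((get_next_loc aloc board).isEmpty = true ∨ (x, y) ∉ board) := Or.inr hm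
      rw [if_pos h1, if_pos hm]
      simp

-- ===== VERDICT (by name: the statement is the Claim_ definition above) =====
theorem dfs_spec : Claim_equal_dfs := by
  intro aloc bloc board step _ _
  unfold Spec_dfs dfs_alt
  exact pv_key board.length board (le_refl _) aloc bloc step
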